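-- pv_equiv track=rewrite | github.com/TheHarshal07/DSA-Problems-Sheet | Binary Search Problems/Search_insert_position.py | searchInposition
-- ===== SOURCE A (Python) =====
-- def searchInposition(arr,n,m):
--     low = 0
--     high = n-1
--     ans = n
--     while(low <= high):
--         mid = (low + high)//2
--         if arr[mid] <= m:
--             ans = mid
--             low = mid+1
--         else:
--             high = mid-1
--     return ans
-- ===== SOURCE B (Python) =====
-- def searchInposition(arr, n, m):
--     # Recursive divide-and-conquer on (base, count) with None as "not found";
--     # probes the same midpoints as the classic binary search.
--     def go(base, cnt):
--         if cnt == 0: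
--             return None
--         k = (cnt - 1) // 2
--         mid = base + k
--         if arr[mid] <= m:
--             r = go(mid + 1, cnt - 1 - k)
--             return mid if r is None else r
--         else:
--             return go(base, k)
--     r = go(0, n if n > 0 else 0)
--     return n if r is None else r
-- ===== Notes on version B (the rewrite author's own statement) =====
-- stated objective: alternative
-- what changed: A's iterative while-loop over mutable (low, high, ans) is replaced by a recursive divide-and-conquer over (base, count) with no accumulator and no sentinel arithmetic: the sub-interval lengths are computed directly, 'not found' is represented by None, and the answer is reconstructed on the way back up.
-- outside the precondition, e.g. on searchInposition([5], 2, 0): A returns 2, B returns 2; on searchInposition([], 1, 0): A raises IndexError, B raises IndexError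
import Mathlib
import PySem

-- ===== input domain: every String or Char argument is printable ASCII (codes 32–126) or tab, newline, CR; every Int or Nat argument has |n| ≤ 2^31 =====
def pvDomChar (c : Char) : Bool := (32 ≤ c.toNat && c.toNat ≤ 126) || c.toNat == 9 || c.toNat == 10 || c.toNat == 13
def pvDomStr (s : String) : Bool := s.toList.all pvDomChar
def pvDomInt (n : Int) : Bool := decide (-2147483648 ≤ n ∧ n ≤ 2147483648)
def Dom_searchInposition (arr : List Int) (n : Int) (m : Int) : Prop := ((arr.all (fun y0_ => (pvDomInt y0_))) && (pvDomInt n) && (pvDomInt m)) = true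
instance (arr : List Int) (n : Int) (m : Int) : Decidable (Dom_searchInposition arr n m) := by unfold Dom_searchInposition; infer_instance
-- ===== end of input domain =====

-- B replaces A's iterative while-loop over mutable (low, high, ans) by an accumulator-free
-- recursive divide-and-conquer over (base, count), with Option instead of the n-sentinel
-- (objective: alternative).

-- ===== PORT A =====
-- A's while-loop over the mutable state (low, high, ans); the Nat fuel is only a
-- totality guard (each iteration shrinks high+1-low by at least 1, so the fuel chosen
-- in searchInposition is never exhausted).
def searchInpositionLoop (arr : List Int) (m : Int) : Nat → Int → Int → Int → Int
  | 0, _, _, ans => ans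
  | fuel + 1, low, high, ans =>
    if low ≤ high then
      let mid := PySem.Int.floordiv (low + high) 2
      if PySem.List.pyGetD arr mid 0 ≤ m then
        searchInpositionLoop arr m fuel (mid + 1) high mid
      else
        searchInpositionLoop arr m fuel low (mid - 1) ans
    else ans

def searchInposition (arr : List Int) (n : Int) (m : Int) : Int :=
  searchInpositionLoop arr m (n.toNat + 1) 0 (n - 1) n

-- ===== PORT B =====
-- B's go(base, cnt): structural descent on the interval LENGTH cnt (a Nat, so the
-- recursion is total by itself — no fuel), Option Nat for "not found".
def sipGo (arr : List Int) (m : Int) : Nat → Nat → Option Nat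
  | _, 0 => none
  | base, cnt + 1 =>
    let k := cnt / 2
    let mid := base + k
    if arr.getD mid 0 ≤ m then
      match sipGo arr m (mid + 1) (cnt - k) with
      | none => some mid
      | some r => some r
    else
      sipGo arr m base k
termination_by _ cnt => cnt
decreasing_by all_goals omega

def searchInposition_alt (arr : List Int) (n : Int) (m : Int) : Int :=
  match sipGo arr m 0 (if n > 0 then n.toNat else 0) with
  | none => n
  | some r => (r : Int)

-- ===== PRECONDITION & SPEC =====
-- Pre_ excludes n > arr.length, where A's arr[mid] can raise IndexError; on some such
-- inputs A happens to return anyway (all probed mids stay in range) and B agrees there,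
-- so the exclusion is only for the raising possibility.
def Pre_searchInposition (arr : List Int) (n : Int) (m : Int) : Prop := n ≤ arr.length
instance (arr : List Int) (n : Int) (m : Int) : Decidable (Pre_searchInposition arr n m) := by unfold Pre_searchInposition; infer_instance
def pvWitness_searchInposition : List Int × Int × Int := ([1, 3, 5], 3, 4)

def Spec_searchInposition (arr : List Int) (n : Int) (m : Int) (out : Int) : Prop := out = searchInposition_alt arr n m
instance (arr : List Int) (n : Int) (m : Int) (out : Int) : Decidable (Spec_searchInposition arr n m out) := by unfold Spec_searchInposition; infer_instance

-- ===== CLAIM (what is proved, stated in full; the proofs are below) =====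
def Claim_equal_searchInposition : Prop := ∀ (arr : List Int) (n : Int) (m : Int), Dom_searchInposition arr n m → Pre_searchInposition arr n m → Spec_searchInposition arr n m (searchInposition arr n m)

-- ===== LEMMAS AND PROOFS =====

-- The midpoint A computes for a nonnegative interval [low, high] is low + (high-low)/2.
lemma mid_eq (low high : Int) (_h0 : 0 ≤ low) (hle : low ≤ high) :
    PySem.Int.floordiv (low + high) 2 = low + (((high - low).toNat / 2 : Nat) : Int) := by
  rw [PySem.Int.floordiv_eq_ediv_of_pos (by omega)]
  omega

-- Loop/recursion correspondence: with enough fuel and a nonnegative in-range interval,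
-- A's loop equals B's Option-valued recursion with 'none' replaced by the accumulator.
lemma loop_eq_go (arr : List Int) (m : Int) :
    ∀ (fuel : Nat) (low high ans : Int), 0 ≤ low → (high + 1 - low).toNat ≤ fuel →
      searchInpositionLoop arr m fuel low high ans =
        (match sipGo arr m low.toNat (high + 1 - low).toNat with
         | none => ans
         | some r => (r : Int)) := by
  intro fuel
  induction fuel with
  | zero =>
    intro low high ans h0 hf
    have : (high + 1 - low).toNat = 0 := by omega
    simp [searchInpositionLoop, this, sipGo]
  | succ fuel ih =>
    intro low high ans h0 hf
    by_cases hle : low ≤ high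
    · obtain ⟨cnt, hcnt⟩ : ∃ cnt, (high + 1 - low).toNat = cnt + 1 :=
        ⟨(high - low).toNat, by omega⟩
      have hk : cnt / 2 = (high - low).toNat / 2 := by omega
      simp only [searchInpositionLoop, if_pos hle, hcnt, sipGo]
      rw [mid_eq low high h0 hle]
      set k : Nat := (high - low).toNat / 2 with hkdef
      have hknat : k ≤ (high - low).toNat := Nat.div_le_self _ _
      set mid : Int := low + (k : Int) with hmiddef
      have hmidnat : mid.toNat = low.toNat + k := by omega
      have hget : PySem.List.pyGetD arr mid 0 = arr.getD (low.toNat + k) 0 := by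
        have : mid = ((low.toNat + k : Nat) : Int) := by omega
        rw [this, PySem.List.pyGetD_natCast]
      rw [hk, hget]
      by_cases hc : arr.getD (low.toNat + k) 0 ≤ m
      · simp only [if_pos hc]
        have hsz : (high + 1 - (mid + 1)).toNat = cnt - k := by omega
        have hbase : (mid + 1).toNat = low.toNat + k + 1 := by omega
        rw [ih (mid + 1) high mid (by omega) (by omega), hsz, hbase]
        cases hres : sipGo arr m (low.toNat + k + 1) (cnt - k) with
        | none => simp only [hmiddef, Int.natCast_add, Int.toNat_of_nonneg h0]
        | some r => rfl
      · simp only [if_neg hc]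
        have hsz : (mid - 1 + 1 - low).toNat = k := by omega
        rw [ih low (mid - 1) ans h0 (by omega), hsz]
    · have : (high + 1 - low).toNat = 0 := by omega
      simp [searchInpositionLoop, hle, this, sipGo]

-- ===== VERDICT (by name: the statement is the Claim_ definition above) =====
theorem searchInposition_spec : Claim_equal_searchInposition := by
  intro arr n m _hdom _hpre
  unfold Spec_searchInposition searchInposition searchInposition_alt
  rw [loop_eq_go arr m (n.toNat + 1) 0 (n - 1) n (by omega) (by omega)]
  have hsz : (n - 1 + 1 - 0).toNat = (if n > 0 then n.toNat else 0) := by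
    split_ifs <;> omega
  rw [hsz]
  simp only [Int.toNat_zero]
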